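-- pv_equiv track=rewrite | github.com/huntzhan/foobar | save_beta_rabbit.py | generate_boundary
-- ===== SOURCE A (Python) =====
-- def generate_boundary(grid):
--     N = len(grid)
--     # upper_bound[i][j]: maximum cost from (i, j) to (N - 1, N - 1)
--     upper_bound = [[0 for c in range(N)] for r in range(N)]
--     # lower_bound[i][j]: minimum cost from (i, j) to (N - 1, N - 1)
--     lower_bound = [[0 for c in range(N)] for r in range(N)]
--     # init.
--     upper_bound[N - 1][N - 1] = grid[N - 1][N - 1]
--     lower_bound[N - 1][N - 1] = grid[N - 1][N - 1]
--
--     for row in reversed(range(N)):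
--         for col in reversed(range(N)):
--             if row == N - 1 and col == N - 1:
--                 continue
--
--             down_upper = None if row == N - 1 else upper_bound[row + 1][col]
--             right_upper = None if col == N - 1 else upper_bound[row][col + 1]
--
--             down_lower = None if row == N - 1 else lower_bound[row + 1][col]
--             right_lower = None if col == N - 1 else lower_bound[row][col + 1]
--
--             not_none = lambda x: x is not None
--             upper_bound[row][col] = max(
--                 filter(not_none, (down_upper, right_upper)),
--             )
--             lower_bound[row][col] = min(
--                 filter(not_none, (down_lower, right_lower)),
--             )
--
--             upper_bound[row][col] += grid[row][col]
--             lower_bound[row][col] += grid[row][col]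
--
--     return upper_bound, lower_bound
-- ===== SOURCE B (Python) =====
-- def generate_boundary(grid):
--     # Recursive/functional re-implementation: builds each table row by row from
--     # the bottom, each row right-to-left from its right neighbours and the row
--     # below, with no mutable NxN tables and no None-filtering max/min.
--     N = len(grid)
--
--     def combine(op, row, below):
--         # cost row for `row` given the cost row `below` (None for the bottom row)
--         if not row:
--             return []
--         rest = combine(op, row[1:], None if below is None else below[1:])
--         down = None if below is None else below[0]
--         right = rest[0] if rest else None
--         if down is None and right is None:
--             v = row[0]
--         elif down is None:
--             v = row[0] + right
--         elif right is None:
--             v = row[0] + down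
--         else:
--             v = row[0] + op(down, right)
--         return [v] + rest
--
--     def build(op, rows):
--         if not rows:
--             return []
--         rest = build(op, rows[1:])
--         below = rest[0] if rest else None
--         return [combine(op, rows[0], below)] + rest
--
--     trimmed = [row[:N] for row in grid]
--     return build(max, trimmed), build(min, trimmed)
-- ===== Notes on version B (the rewrite author's own statement) =====
-- stated objective: alternative
-- what changed: Replaces A's two mutable NxN tables filled by a reversed double index loop with None-filtered max/min into pure structural recursion: each cost row is built by recursion from the row below and the cell to the right, rows assembled bottom-up.
import Mathlib
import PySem

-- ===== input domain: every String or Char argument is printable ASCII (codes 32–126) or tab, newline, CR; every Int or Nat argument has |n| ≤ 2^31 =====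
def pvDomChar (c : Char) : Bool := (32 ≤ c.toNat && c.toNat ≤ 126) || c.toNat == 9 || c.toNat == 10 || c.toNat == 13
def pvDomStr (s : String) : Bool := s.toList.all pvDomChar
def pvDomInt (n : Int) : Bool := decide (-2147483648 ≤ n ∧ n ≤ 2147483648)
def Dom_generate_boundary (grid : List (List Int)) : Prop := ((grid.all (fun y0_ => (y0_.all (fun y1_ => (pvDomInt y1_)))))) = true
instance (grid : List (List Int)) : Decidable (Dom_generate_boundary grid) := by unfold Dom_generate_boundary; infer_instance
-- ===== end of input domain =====

-- B re-implements the DP as pure structural recursion (rows bottom-up, cells right-to-left)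
-- instead of A's two mutable N×N tables filled by a reversed double index loop; objective: alternative decomposition.
-- Pre_ excludes the inputs where A raises IndexError (empty grid / a row shorter than len(grid)).

-- ===== PORT A =====
-- one cell update of one table: the four `down/right` reads, the max/min over the
-- non-None ones (sel = max?/min? with identity key), and the write tab[row][col] = v + grid[row][col]
def aCell (sel : List Int → Option Int) (N : Int) (grid tab : List (List Int)) (row col : Int) : List (List Int) :=
  let down : Option Int := if row = N - 1 then none else some (PySem.List.pyGetD (PySem.List.pyGetD tab (row + 1) []) col 0)
  let right : Option Int := if col = N - 1 then none else some (PySem.List.pyGetD (PySem.List.pyGetD tab row []) (col + 1) 0)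
  -- max(filter(not_none, (down, right))) ; the `.getD 0` default is unreachable: the
  -- corner (row = N-1 ∧ col = N-1) is skipped by `continue`, so the filtered list is nonempty
  let v : Int := (sel ([down, right].filterMap id)).getD 0
  let gv : Int := PySem.List.pyGetD (PySem.List.pyGetD grid row []) col 0
  PySem.List.pySetD tab row (PySem.List.pySetD (PySem.List.pyGetD tab row []) col (v + gv))

def generate_boundary (grid : List (List Int)) : List (List Int) × List (List Int) :=
  let N : Int := PySem.List.len grid
  -- upper_bound / lower_bound = [[0 for c in range(N)] for r in range(N)]
  let ub0 := (PySem.List.pyRange 0 N 1).map (fun _ => (PySem.List.pyRange 0 N 1).map (fun _ => (0 : Int)))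
  let lb0 := (PySem.List.pyRange 0 N 1).map (fun _ => (PySem.List.pyRange 0 N 1).map (fun _ => (0 : Int)))
  -- init: tables[N-1][N-1] = grid[N-1][N-1]  (in range under Pre_)
  let g : Int := PySem.List.pyGetD (PySem.List.pyGetD grid (N - 1) []) (N - 1) 0
  let ub1 := PySem.List.pySetD ub0 (N - 1) (PySem.List.pySetD (PySem.List.pyGetD ub0 (N - 1) []) (N - 1) g)
  let lb1 := PySem.List.pySetD lb0 (N - 1) (PySem.List.pySetD (PySem.List.pyGetD lb0 (N - 1) []) (N - 1) g)
  -- for row in reversed(range(N)): for col in reversed(range(N)): …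
  (PySem.List.pyRange (N - 1) (-1) (-1)).foldl (fun st row =>
    (PySem.List.pyRange (N - 1) (-1) (-1)).foldl (fun st2 col =>
      if row = N - 1 ∧ col = N - 1 then st2
      else (aCell (fun xs => PySem.List.max? xs (fun x => x)) N grid st2.1 row col,
            aCell (fun xs => PySem.List.min? xs (fun x => x)) N grid st2.2 row col)) st)
    (ub1, lb1)

-- ===== PORT B =====
-- combine(op, row, below): cost row for `row` given the cost row `below` (none for the bottom row)
def gbCombine (op : Int → Int → Int) : List Int → Option (List Int) → List Int
  | [], _ => []
  | v :: rs, below =>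
    let rest := gbCombine op rs (below.map (List.drop 1))          -- below[1:]
    let down : Option Int := below.bind (fun b => b[0]?)           -- below[0] (in range under Pre_)
    let right : Option Int := rest.head?                           -- rest[0] if rest else None
    match down, right with
    | none, none => v :: rest
    | none, some rv => (v + rv) :: rest
    | some dv, none => (v + dv) :: rest
    | some dv, some rv => (v + op dv rv) :: rest

-- build(op, rows): rest = build(op, rows[1:]); below = rest[0] if rest else None
def gbBuild (op : Int → Int → Int) : List (List Int) → List (List Int)
  | [] => []
  | row :: rows =>
    let rest := gbBuild op rows
    gbCombine op row rest.head? :: rest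

def generate_boundary_alt (grid : List (List Int)) : List (List Int) × List (List Int) :=
  let N : Int := PySem.List.len grid
  let trimmed := grid.map (fun row => PySem.List.slice row none (some N))   -- row[:N]
  (gbBuild (fun a b => max a b) trimmed, gbBuild (fun a b => min a b) trimmed)

-- ===== PRECONDITION & SPEC =====
-- Pre_ excludes exactly the inputs where A raises IndexError: the empty grid
-- (the init line indexes [-1] into an empty table) and grids with a row shorter
-- than len(grid) (grid[row][col] goes out of range).
def Pre_generate_boundary (grid : List (List Int)) : Prop :=
  grid ≠ [] ∧ ∀ row ∈ grid, grid.length ≤ row.length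
instance (grid : List (List Int)) : Decidable (Pre_generate_boundary grid) := by
  unfold Pre_generate_boundary; infer_instance

def pvWitness_generate_boundary : List (List Int) := [[1, 2], [3, 4]]

def Spec_generate_boundary (grid : List (List Int)) (out : List (List Int) × List (List Int)) : Prop := out = generate_boundary_alt grid
instance (grid : List (List Int)) (out : List (List Int) × List (List Int)) : Decidable (Spec_generate_boundary grid out) := by unfold Spec_generate_boundary; infer_instance

-- ===== CLAIM (what is proved, stated in full; the proofs are below) =====
def Claim_equal_generate_boundary : Prop := ∀ (grid : List (List Int)), Dom_generate_boundary grid → Pre_generate_boundary grid → Spec_generate_boundary grid (generate_boundary grid)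

-- ===== LEMMAS AND PROOFS =====

theorem gbCombine_length (op : Int → Int → Int) (row : List Int) (below : Option (List Int)) :
    (gbCombine op row below).length = row.length := by
  induction row generalizing below with
  | nil => rfl
  | cons v rs ih =>
    cases hd : (below.bind fun b => b[0]?) <;>
      cases hr : (gbCombine op rs (below.map (List.drop 1))).head? <;>
      simp [gbCombine, hd, hr, ih]

theorem gbCombine_tail (op : Int → Int → Int) (v : Int) (rs : List Int) (below : Option (List Int)) :
    (gbCombine op (v :: rs) below).drop 1 = gbCombine op rs (below.map (List.drop 1)) := by
  cases hd : (below.bind fun b => b[0]?) <;>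
    cases hr : (gbCombine op rs (below.map (List.drop 1))).head? <;>
    simp [gbCombine, hd, hr]

theorem gbCombine_drop (op : Int → Int → Int) (row : List Int) (below : Option (List Int)) (c : Nat) :
    (gbCombine op row below).drop c = gbCombine op (row.drop c) (below.map (List.drop c)) := by
  induction c generalizing row below with
  | zero =>
    simp only [List.drop_zero]
    cases below <;> simp
  | succ c ih =>
    cases row with
    | nil => cases below <;> simp [gbCombine]
    | cons v rs =>
      have h1 : (gbCombine op (v :: rs) below).drop (c + 1)
          = ((gbCombine op (v :: rs) below).drop 1).drop c := by
        rw [List.drop_drop, Nat.add_comm]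
      rw [h1, gbCombine_tail, ih]
      have h2 : (below.map (List.drop 1)).map (List.drop c) = below.map (List.drop (c + 1)) := by
        cases below <;> simp
      simp [h2]

theorem gbBuild_length (op : Int → Int → Int) (rows : List (List Int)) :
    (gbBuild op rows).length = rows.length := by
  induction rows with
  | nil => rfl
  | cons r rs ih => simp [gbBuild, ih]

theorem gbBuild_drop (op : Int → Int → Int) (rows : List (List Int)) (k : Nat) :
    (gbBuild op rows).drop k = gbBuild op (rows.drop k) := by
  induction k generalizing rows with
  | zero => simp
  | succ k ih =>
    cases rows with
    | nil => simp [gbBuild]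
    | cons r rs => simpa [gbBuild] using ih rs


-- ---- proof-side abbreviations ----
def gval (grid : List (List Int)) (r c : Nat) : Int := (grid.getD r []).getD c 0
def trimG (grid : List (List Int)) : List (List Int) := grid.map (fun row => row.take grid.length)
def uTab (op : Int → Int → Int) (grid : List (List Int)) : List (List Int) := gbBuild op (trimG grid)
def urow (op : Int → Int → Int) (grid : List (List Int)) (r : Nat) : List Int := (uTab op grid).getD r []
def zps (n : Nat) (g : Int) : List Int := (List.replicate n (0 : Int)).set (n - 1) g
def initT (n : Nat) (g : Int) : List (List Int) :=
  (List.replicate n (List.replicate n (0 : Int))).set (n - 1) (zps n g)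
def mix (op : Int → Int → Int) (grid : List (List Int)) (r c : Nat) : List Int :=
  if r = grid.length - 1 ∧ c = grid.length then zps grid.length (gval grid (grid.length - 1) (grid.length - 1))
  else List.replicate c (0 : Int) ++ (urow op grid r).drop c

theorem getD_append_lt {α : Type} (l l' : List α) (n : Nat) (d : α) (h : n < l.length) :
    (l ++ l').getD n d = l.getD n d := by
  simp [List.getD, List.getElem?_append_left h]

theorem getD_append_ge {α : Type} (l l' : List α) (n : Nat) (d : α) (h : l.length ≤ n) :
    (l ++ l').getD n d = l'.getD (n - l.length) d := by
  simp [List.getD, List.getElem?_append_right h]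

theorem getD_drop {α : Type} (l : List α) (m k : Nat) (d : α) :
    (l.drop m).getD k d = l.getD (m + k) d := by
  simp [List.getD, List.getElem?_drop]

theorem trimG_length (grid : List (List Int)) : (trimG grid).length = grid.length := by
  simp [trimG]

theorem uTab_length (op : Int → Int → Int) (grid : List (List Int)) :
    (uTab op grid).length = grid.length := by
  simp [uTab, gbBuild_length, trimG_length]

theorem uTab_drop_eq (op : Int → Int → Int) (grid : List (List Int)) (r : Nat)
    (hr : r < grid.length) :
    (uTab op grid).drop r = urow op grid r :: (uTab op grid).drop (r + 1) := by
  have h : r < (uTab op grid).length := by rw [uTab_length]; exact hr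
  rw [List.drop_eq_getElem_cons h, urow, List.getD_eq_getElem _ _ h]

theorem urow_eq_combine (op : Int → Int → Int) (grid : List (List Int)) (r : Nat)
    (hr : r < grid.length) :
    urow op grid r
      = gbCombine op ((grid.getD r []).take grid.length) (((uTab op grid).drop (r + 1)).head?) := by
  have ht : r < (trimG grid).length := by rw [trimG_length]; exact hr
  have h2 : (trimG grid).drop r = (trimG grid)[r] :: (trimG grid).drop (r + 1) :=
    List.drop_eq_getElem_cons ht
  have h3 : (uTab op grid).drop r = gbBuild op ((trimG grid)[r] :: (trimG grid).drop (r + 1)) := by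
    rw [uTab, gbBuild_drop, ← h2]
  have h4 : (trimG grid)[r] = (grid.getD r []).take grid.length := by
    simp [trimG, List.getD, List.getElem?_eq_getElem hr]
  have h5 := uTab_drop_eq op grid r hr
  rw [h3, h4] at h5
  have h6 : (uTab op grid).drop (r + 1) = gbBuild op ((trimG grid).drop (r + 1)) := by
    rw [uTab, gbBuild_drop]
  simp only [gbBuild] at h5
  rw [← h6] at h5
  exact (List.cons.injEq _ _ _ _ ▸ h5).1.symm ▸ rfl

theorem urow_length (op : Int → Int → Int) (grid : List (List Int))
    (h2 : ∀ row ∈ grid, grid.length ≤ row.length) (r : Nat) (hr : r < grid.length) :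
    (urow op grid r).length = grid.length := by
  rw [urow_eq_combine op grid r hr, gbCombine_length]
  have hm : grid.getD r [] ∈ grid := by
    rw [List.getD_eq_getElem _ _ hr]; exact List.getElem_mem hr
  rw [List.length_take]
  exact Nat.min_eq_left (h2 _ hm)

theorem uTab_drop_head (op : Int → Int → Int) (grid : List (List Int)) (r : Nat)
    (hr : r < grid.length) :
    ((uTab op grid).drop r).head? = some (urow op grid r) := by
  rw [uTab_drop_eq op grid r hr]; rfl

theorem uTab_drop_none (op : Int → Int → Int) (grid : List (List Int)) :
    ((uTab op grid).drop grid.length).head? = none := by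
  rw [List.drop_of_length_le (by rw [uTab_length])]; rfl


theorem getElem?_eq_some_getD {α : Type} [Inhabited α] (l : List α) (k : Nat) (d : α)
    (hk : k < l.length) : l[k]? = some (l.getD k d) := by
  rw [List.getElem?_eq_getElem hk, List.getD_eq_getElem _ _ hk]

theorem urow_drop_succ (op : Int → Int → Int) (grid : List (List Int))
    (h2 : ∀ row ∈ grid, grid.length ≤ row.length) (r c : Nat)
    (hr : r < grid.length) (hc : c < grid.length) :
    (urow op grid r).drop c =
      (match (if r + 1 < grid.length then some ((urow op grid (r + 1)).getD c 0) else none),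
             (if c + 1 < grid.length then some ((urow op grid r).getD (c + 1) 0) else none) with
       | none, none => gval grid r c
       | none, some rv => gval grid r c + rv
       | some dv, none => gval grid r c + dv
       | some dv, some rv => gval grid r c + op dv rv) :: (urow op grid r).drop (c + 1) := by
  have hm : grid.getD r [] ∈ grid := by
    rw [List.getD_eq_getElem _ _ hr]; exact List.getElem_mem hr
  have hlen : ((grid.getD r []).take grid.length).length = grid.length := by
    rw [List.length_take]; exact Nat.min_eq_left (h2 _ hm)
  have hclen : c < ((grid.getD r []).take grid.length).length := by rw [hlen]; exact hc
  have hcons : ((grid.getD r []).take grid.length).drop c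
      = gval grid r c :: ((grid.getD r []).take grid.length).drop (c + 1) := by
    rw [List.drop_eq_getElem_cons hclen]
    congr 1
    have hc2 : c < (grid.getD r []).length := lt_of_lt_of_le hc (h2 _ hm)
    simp only [List.getElem_take]
    rw [gval, List.getD_eq_getElem _ _ hc2]
  have hdrop : (urow op grid r).drop c
      = gbCombine op (((grid.getD r []).take grid.length).drop c)
          ((((uTab op grid).drop (r + 1)).head?).map (List.drop c)) := by
    rw [urow_eq_combine op grid r hr, gbCombine_drop]
  have hmapmap : ((((uTab op grid).drop (r + 1)).head?).map (List.drop c)).map (List.drop 1)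
      = (((uTab op grid).drop (r + 1)).head?).map (List.drop (c + 1)) := by
    cases ((uTab op grid).drop (r + 1)).head? <;> simp [List.drop_drop]
  have hrest : gbCombine op (((grid.getD r []).take grid.length).drop (c + 1))
        ((((uTab op grid).drop (r + 1)).head?).map (List.drop (c + 1)))
      = (urow op grid r).drop (c + 1) := by
    rw [← gbCombine_drop, ← urow_eq_combine op grid r hr]
  rw [hdrop, hcons]
  simp only [gbCombine, hmapmap, hrest]
  have hright : ((urow op grid r).drop (c + 1)).head?
      = if c + 1 < grid.length then some ((urow op grid r).getD (c + 1) 0) else none := by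
    rw [List.head?_drop]
    by_cases hc1 : c + 1 < grid.length
    · rw [if_pos hc1]
      exact getElem?_eq_some_getD _ _ _ (by rw [urow_length op grid h2 r hr]; exact hc1)
    · rw [if_neg hc1]
      exact List.getElem?_eq_none (by rw [urow_length op grid h2 r hr]; omega)
  have hdown : ((((uTab op grid).drop (r + 1)).head?).map (List.drop c)).bind (fun b => b[0]?)
      = if r + 1 < grid.length then some ((urow op grid (r + 1)).getD c 0) else none := by
    by_cases hd : r + 1 < grid.length
    · rw [if_pos hd, uTab_drop_head op grid (r + 1) hd]
      simp only [Option.map_some, Option.bind_some]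
      rw [List.getElem?_drop, Nat.add_zero]
      exact getElem?_eq_some_getD _ _ _ (by rw [urow_length op grid h2 (r + 1) hd]; exact hc)
    · have : r + 1 = grid.length := by omega
      rw [if_neg hd, this, uTab_drop_none op grid]
      rfl
  rw [hdown, hright]
  split_ifs <;> rfl


theorem urow_getD (op : Int → Int → Int) (grid : List (List Int))
    (h2 : ∀ row ∈ grid, grid.length ≤ row.length) (r c : Nat)
    (hr : r < grid.length) (hc : c < grid.length) :
    (urow op grid r).getD c 0 =
      (match (if r + 1 < grid.length then some ((urow op grid (r + 1)).getD c 0) else none),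
             (if c + 1 < grid.length then some ((urow op grid r).getD (c + 1) 0) else none) with
       | none, none => gval grid r c
       | none, some rv => gval grid r c + rv
       | some dv, none => gval grid r c + dv
       | some dv, some rv => gval grid r c + op dv rv) := by
  have h := congrArg List.head? (urow_drop_succ op grid h2 r c hr hc)
  rw [List.head?_drop] at h
  simp only [List.head?_cons] at h
  simp [List.getD, h]

theorem aCell_step (sel : List Int → Option Int) (op : Int → Int → Int)
    (hsel1 : ∀ a : Int, sel [a] = some a)
    (hsel2 : ∀ a b : Int, sel [a, b] = some (op a b))
    (grid : List (List Int))
    (h2 : ∀ row ∈ grid, grid.length ≤ row.length) (r c : Nat)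
    (hr : r < grid.length) (hc : c < grid.length)
    (hnc : ¬(r = grid.length - 1 ∧ c = grid.length - 1)) :
    aCell sel (grid.length : Int) grid
        ((initT grid.length (gval grid (grid.length - 1) (grid.length - 1))).take r
          ++ [mix op grid r (c + 1)] ++ (uTab op grid).drop (r + 1)) (r : Int) (c : Int)
      = (initT grid.length (gval grid (grid.length - 1) (grid.length - 1))).take r
          ++ [mix op grid r c] ++ (uTab op grid).drop (r + 1) := by
  set n := grid.length with hn
  set g := gval grid (n - 1) (n - 1) with hg
  set A := (initT n g).take r with hAd
  set S := (uTab op grid).drop (r + 1) with hSd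
  set M := mix op grid r (c + 1) with hM
  have hA : A.length = r := by
    simp [hAd, initT]; omega
  have hcc : ¬(r = n - 1 ∧ c + 1 = n) := by omega
  have hMe : M = List.replicate (c + 1) (0 : Int) ++ (urow op grid r).drop (c + 1) := by
    rw [hM, mix, if_neg (by rw [← hn]; exact hcc)]
  have hlen_urow := urow_length op grid h2 r hr
  have htabr : (A ++ [M] ++ S).getD r [] = M := by
    rw [getD_append_lt _ _ _ _ (by simp [hA]), getD_append_ge _ _ _ _ (hA.le)]
    simp [hA]
  have htabr1 : r + 1 < n → (A ++ [M] ++ S).getD (r + 1) [] = urow op grid (r + 1) := by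
    intro hd
    rw [getD_append_ge _ _ _ _ (by simp [hA])]
    have : r + 1 - (A ++ [M]).length = 0 := by simp [hA]
    rw [this, hSd, getD_drop, urow, Nat.add_zero]
  have hMg : M.getD (c + 1) 0 = (urow op grid r).getD (c + 1) 0 := by
    rw [hMe, getD_append_ge _ _ _ _ (by simp), getD_drop]
    simp
  have hset : M.set c ((urow op grid r).getD c 0) = mix op grid r c := by
    have h1 : ¬(r = n - 1 ∧ c = n) := by omega
    rw [mix, if_neg (by rw [← hn]; exact h1), hMe, List.replicate_succ', List.append_assoc,
      List.set_append_right _ _ (by simp)]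
    have h3 : c - (List.replicate c (0 : Int)).length = 0 := by simp
    rw [h3]
    have h4 : (urow op grid r).drop c
        = (urow op grid r).getD c 0 :: (urow op grid r).drop (c + 1) := by
      rw [List.drop_eq_getElem_cons (by omega : c < (urow op grid r).length),
        List.getD_eq_getElem _ _ (by omega : c < (urow op grid r).length)]
    rw [h4]
    rfl
  have houter : ∀ X : List Int, (A ++ [M] ++ S).set r X = A ++ [X] ++ S := by
    intro X
    rw [List.set_append_left _ _ (by simp [hA]), List.set_append_right _ _ hA.le]
    simp [hA]
  have hcast1 : ((r : Int) + 1) = ((r + 1 : Nat) : Int) := by push_cast; ring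
  have hcast2 : ((c : Int) + 1) = ((c + 1 : Nat) : Int) := by push_cast; ring
  simp only [aCell, hcast1, hcast2, PySem.List.pyGetD_natCast, PySem.List.pySetD_natCast]
  have hgv : (grid.getD r []).getD c 0 = gval grid r c := rfl
  rw [htabr, hgv, houter]
  have hurow := urow_getD op grid h2 r c hr hc
  by_cases hdlt : r + 1 < n
  · rw [if_neg (by omega : ¬((r : Int) = (n : Int) - 1)), htabr1 hdlt]
    by_cases hclt : c + 1 < n
    · rw [if_neg (by omega : ¬((c : Int) = (n : Int) - 1)), hMg]
      simp only [List.filterMap, id]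
      rw [hsel2]
      simp only [Option.getD_some]
      rw [if_pos hdlt, if_pos hclt] at hurow
      rw [show (op ((urow op grid (r + 1)).getD c 0) ((urow op grid r).getD (c + 1) 0) + gval grid r c)
            = (urow op grid r).getD c 0 by rw [hurow]; ring, hset]
    · rw [if_pos (by omega : ((c : Int) = (n : Int) - 1))]
      simp only [List.filterMap, id]
      rw [hsel1]
      simp only [Option.getD_some]
      rw [if_pos hdlt, if_neg hclt] at hurow
      rw [show ((urow op grid (r + 1)).getD c 0 + gval grid r c) = (urow op grid r).getD c 0 by
        rw [hurow]; ring, hset]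
  · have hclt : c + 1 < n := by omega
    rw [if_pos (by omega : ((r : Int) = (n : Int) - 1)),
      if_neg (by omega : ¬((c : Int) = (n : Int) - 1)), hMg]
    simp only [List.filterMap, id]
    rw [hsel1]
    simp only [Option.getD_some]
    rw [if_neg hdlt, if_pos hclt] at hurow
    rw [show ((urow op grid r).getD (c + 1) 0 + gval grid r c) = (urow op grid r).getD c 0 by
      rw [hurow]; ring, hset]


theorem zps_eq (n : Nat) (g : Int) (hn : 1 ≤ n) :
    zps n g = List.replicate (n - 1) (0 : Int) ++ [g] := by
  rw [zps, show n = (n - 1) + 1 by omega, List.replicate_succ', Nat.add_sub_cancel,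
    List.set_append_right _ _ (by simp), show (n-1) - (List.replicate (n-1) (0:Int)).length = 0 by simp]
  rfl

theorem urow_last_drop (op : Int → Int → Int) (grid : List (List Int))
    (h2 : ∀ row ∈ grid, grid.length ≤ row.length) (hn : 1 ≤ grid.length) :
    (urow op grid (grid.length - 1)).drop (grid.length - 1)
      = [gval grid (grid.length - 1) (grid.length - 1)] := by
  have h := urow_drop_succ op grid h2 (grid.length - 1) (grid.length - 1) (by omega) (by omega)
  rw [if_neg (by omega), if_neg (by omega)] at h
  have hd : (urow op grid (grid.length - 1)).drop ((grid.length - 1) + 1) = [] :=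
    List.drop_of_length_le (by rw [urow_length op grid h2 _ (by omega)]; omega)
  rw [hd] at h
  exact h

theorem mix_corner (op : Int → Int → Int) (grid : List (List Int))
    (h2 : ∀ row ∈ grid, grid.length ≤ row.length) (hn : 1 ≤ grid.length) :
    mix op grid (grid.length - 1) grid.length
      = mix op grid (grid.length - 1) (grid.length - 1) := by
  rw [mix, if_pos ⟨rfl, rfl⟩, mix, if_neg (by omega),
    urow_last_drop op grid h2 hn, zps_eq _ _ hn]

theorem mix_zero (op : Int → Int → Int) (grid : List (List Int))
    (hn : 1 ≤ grid.length) (r : Nat) :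
    mix op grid r 0 = urow op grid r := by
  rw [mix, if_neg (by omega)]
  simp

theorem mix_top (op : Int → Int → Int) (grid : List (List Int))
    (h2 : ∀ row ∈ grid, grid.length ≤ row.length) (r : Nat) (hr : r < grid.length)
    (hne : r ≠ grid.length - 1) :
    mix op grid r grid.length = List.replicate grid.length (0 : Int) := by
  rw [mix, if_neg (by omega), List.drop_of_length_le (by rw [urow_length op grid h2 _ hr])]
  simp

theorem innerInv (sel : List Int → Option Int) (op : Int → Int → Int)
    (hsel1 : ∀ a : Int, sel [a] = some a)
    (hsel2 : ∀ a b : Int, sel [a, b] = some (op a b))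
    (grid : List (List Int))
    (h2 : ∀ row ∈ grid, grid.length ≤ row.length) (r : Nat) (hr : r < grid.length)
    (m : Nat) (hm : m ≤ grid.length) :
    ((List.range m).map (fun (k : Nat) => (grid.length : Int) - 1 - (k : Int))).foldl
      (fun tab2 col => if (r : Int) = (grid.length : Int) - 1 ∧ col = (grid.length : Int) - 1
        then tab2 else aCell sel (grid.length : Int) grid tab2 (r : Int) col)
      ((initT grid.length (gval grid (grid.length - 1) (grid.length - 1))).take r
        ++ [mix op grid r grid.length] ++ (uTab op grid).drop (r + 1))
    = (initT grid.length (gval grid (grid.length - 1) (grid.length - 1))).take r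
        ++ [mix op grid r (grid.length - m)] ++ (uTab op grid).drop (r + 1) := by
  induction m with
  | zero => simp
  | succ m ih =>
    rw [List.range_succ, List.map_append, List.foldl_append, ih (by omega)]
    simp only [List.map_cons, List.map_nil, List.foldl_cons, List.foldl_nil]
    set n := grid.length with hn
    have hcast : ((n : Int) - 1 - (m : Nat)) = ((n - 1 - m : Nat) : Int) := by omega
    set c := n - 1 - m with hc
    by_cases hcorner : r = n - 1 ∧ c = n - 1
    · rw [if_pos (by constructor <;> omega)]
      have hm0 : m = 0 := by omega
      rw [hm0, hcorner.1]
      rw [show n - 0 = n by omega, show n - 1 = n - (0 + 1) by omega] at *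
      rw [mix_corner op grid h2 (by omega)]
    · rw [if_neg (by
        intro hcon
        exact hcorner ⟨by omega, by omega⟩)]
      rw [hcast, show n - m = c + 1 by omega, show n - (m + 1) = c by omega]
      exact aCell_step sel op hsel1 hsel2 grid h2 r c hr (by omega) hcorner

theorem initT_getD (n : Nat) (g : Int) (r : Nat) (hr : r < n) :
    (initT n g).getD r [] = if r = n - 1 then zps n g else List.replicate n (0 : Int) := by
  rw [initT, List.getD]
  by_cases h : r = n - 1
  · rw [if_pos h, h, List.getElem?_set_self (by simp; omega)]
    rfl
  · rw [if_neg h, List.getElem?_set_ne (by omega), List.getElem?_replicate_of_lt hr]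
    rfl

theorem outerInv (sel : List Int → Option Int) (op : Int → Int → Int)
    (hsel1 : ∀ a : Int, sel [a] = some a)
    (hsel2 : ∀ a b : Int, sel [a, b] = some (op a b))
    (grid : List (List Int)) (h1 : 1 ≤ grid.length)
    (h2 : ∀ row ∈ grid, grid.length ≤ row.length)
    (m : Nat) (hm : m ≤ grid.length) :
    ((List.range m).map (fun (k : Nat) => (grid.length : Int) - 1 - (k : Int))).foldl
      (fun tab row => ((List.range grid.length).map (fun (k : Nat) => (grid.length : Int) - 1 - (k : Int))).foldl
        (fun tab2 col => if row = (grid.length : Int) - 1 ∧ col = (grid.length : Int) - 1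
          then tab2 else aCell sel (grid.length : Int) grid tab2 row col) tab)
      (initT grid.length (gval grid (grid.length - 1) (grid.length - 1)))
    = (initT grid.length (gval grid (grid.length - 1) (grid.length - 1))).take (grid.length - m)
        ++ (uTab op grid).drop (grid.length - m) := by
  induction m with
  | zero =>
    rw [Nat.sub_zero, List.take_of_length_le (by simp [initT]),
      List.drop_of_length_le (by rw [uTab_length])]
    simp
  | succ m ih =>
    rw [List.range_succ, List.map_append, List.foldl_append, ih (by omega)]
    simp only [List.map_cons, List.map_nil, List.foldl_cons, List.foldl_nil]
    set n := grid.length with hn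
    set r := n - 1 - m with hrd
    have hr : r < n := by omega
    have hcast : ((n : Int) - 1 - (m : Nat)) = ((r : Nat) : Int) := by omega
    rw [hcast]
    have htake : (initT n (gval grid (n - 1) (n - 1))).take (n - m)
        = (initT n (gval grid (n - 1) (n - 1))).take r ++ [mix op grid r n] := by
      rw [show n - m = r + 1 by omega, List.take_add_one]
      congr 1
      have hlt : r < (initT n (gval grid (n - 1) (n - 1))).length := by simp [initT]; omega
      rw [List.getElem?_eq_getElem hlt]
      simp only [Option.toList_some]
      congr 1
      rw [← List.getD_eq_getElem _ [] hlt, initT_getD n _ r hr]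
      by_cases hre : r = n - 1
      · rw [if_pos hre, hre, mix_corner op grid h2 h1, mix, if_neg (by omega),
          urow_last_drop op grid h2 h1, zps_eq _ _ h1]
      · rw [if_neg hre, mix_top op grid h2 r hr hre]
    rw [htake, List.append_assoc]
    rw [show (([mix op grid r n] : List (List Int)) ++ (uTab op grid).drop (n - m))
        = [mix op grid r n] ++ (uTab op grid).drop (r + 1) by rw [show n - m = r + 1 by omega]]
    rw [← List.append_assoc]
    rw [innerInv sel op hsel1 hsel2 grid h2 r hr n (le_refl n)]
    rw [show n - n = 0 by omega, mix_zero op grid h1 r, show n - (m + 1) = r by omega,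
      List.append_assoc]
    congr 1
    rw [uTab_drop_eq op grid r hr]
    rfl


theorem tableA (sel : List Int → Option Int) (op : Int → Int → Int)
    (hsel1 : ∀ a : Int, sel [a] = some a)
    (hsel2 : ∀ a b : Int, sel [a, b] = some (op a b))
    (grid : List (List Int)) (h1 : 1 ≤ grid.length)
    (h2 : ∀ row ∈ grid, grid.length ≤ row.length) :
    ((List.range grid.length).map (fun (k : Nat) => (grid.length : Int) - 1 - (k : Int))).foldl
      (fun tab row => ((List.range grid.length).map (fun (k : Nat) => (grid.length : Int) - 1 - (k : Int))).foldl
        (fun tab2 col => if row = (grid.length : Int) - 1 ∧ col = (grid.length : Int) - 1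
          then tab2 else aCell sel (grid.length : Int) grid tab2 row col) tab)
      (initT grid.length (gval grid (grid.length - 1) (grid.length - 1)))
    = uTab op grid := by
  have h := outerInv sel op hsel1 hsel2 grid h1 h2 grid.length (le_refl _)
  rw [Nat.sub_self] at h
  simpa using h

theorem max_sel_one (a : Int) : PySem.List.max? [a] (fun x => x) = some a := by
  rw [PySem.List.max?_id_cons]; rfl

theorem max_sel_two (a b : Int) : PySem.List.max? [a, b] (fun x => x) = some (max a b) := by
  rw [PySem.List.max?_id_cons]; rfl

theorem min_sel_one (a : Int) : PySem.List.min? [a] (fun x => x) = some a := by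
  rw [PySem.List.min?_id_cons]; rfl

theorem min_sel_two (a b : Int) : PySem.List.min? [a, b] (fun x => x) = some (min a b) := by
  rw [PySem.List.min?_id_cons]; rfl

theorem alt_eq (grid : List (List Int)) :
    generate_boundary_alt grid
      = (gbBuild (fun a b => max a b) (trimG grid), gbBuild (fun a b => min a b) (trimG grid)) := by
  simp [generate_boundary_alt, trimG, PySem.List.len_eq, PySem.List.slice_to_natCast]

-- ===== VERDICT (by name: the statement is the Claim_ definition above) =====
theorem generate_boundary_spec : Claim_equal_generate_boundary := by
  intro grid _ hpre
  obtain ⟨hne, h2⟩ := hpre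
  have h1 : 1 ≤ grid.length := by
    cases grid with
    | nil => exact absurd rfl hne
    | cons a l => simp
  show generate_boundary grid = generate_boundary_alt grid
  rw [alt_eq]
  simp only [generate_boundary, PySem.List.len_eq]
  set n := grid.length with hn
  have hg : PySem.List.pyGetD (PySem.List.pyGetD grid ((n : Int) - 1) []) ((n : Int) - 1) 0
      = gval grid (n - 1) (n - 1) := by
    have hb1 : ((n : Int) - 1) < (grid.length : Int) := by omega
    rw [PySem.List.pyGetD_eq_getElem _ _ (by omega) hb1]
    have ht : ((n : Int) - 1).toNat = n - 1 := by omega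
    have hmem : grid[((n : Int) - 1).toNat] ∈ grid := List.getElem_mem _
    have hlen : n ≤ grid[((n : Int) - 1).toNat].length := h2 _ hmem
    rw [PySem.List.pyGetD_eq_getElem _ _ (by omega) (by omega)]
    rw [gval]
    simp only [ht]
    have hlt : n - 1 < grid.length := by omega
    have hlen2 : n - 1 < grid[n - 1].length := by
      have := h2 _ (List.getElem_mem hlt)
      omega
    rw [List.getD_eq_getElem _ _ hlt, List.getD_eq_getElem _ _ hlen2]
  have hz : (PySem.List.pyRange 0 (n : Int) 1).map
        (fun _ => (PySem.List.pyRange 0 (n : Int) 1).map (fun _ => (0 : Int)))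
      = List.replicate n (List.replicate n (0 : Int)) := by
    rw [List.map_const', List.map_const', PySem.List.length_pyRange_one]
    have he : ((n : Int) - 0).toNat = n := by omega
    rw [he]
  rw [hz, hg]
  have hpg : PySem.List.pyGetD (List.replicate n (List.replicate n (0 : Int))) ((n : Int) - 1) []
      = List.replicate n (0 : Int) := by
    rw [PySem.List.pyGetD_eq_getElem _ _ (by omega) (by simp)]
    simp
  rw [hpg]
  have htoNat : ((n : Int) - 1).toNat = n - 1 := by omega
  have hinit : PySem.List.pySetD (List.replicate n (List.replicate n (0 : Int))) ((n : Int) - 1)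
        (PySem.List.pySetD (List.replicate n (0 : Int)) ((n : Int) - 1)
          (gval grid (n - 1) (n - 1)))
      = initT n (gval grid (n - 1) (n - 1)) := by
    rw [PySem.List.pySetD_of_nonneg _ _ (by omega), PySem.List.pySetD_of_nonneg _ _ (by omega),
      htoNat, initT, zps]
  rw [hinit]
  have hrange : PySem.List.pyRange ((n : Int) - 1) (-1) (-1)
      = (List.range n).map (fun (k : Nat) => (n : Int) - 1 - (k : Int)) := by
    have he : ((n : Int) - 1 - (-1)).toNat = n := by omega
    rw [PySem.List.pyRange_neg_one, he]
  rw [hrange]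
  have hsplit : ∀ (l : List Int) (row : Int) (st : List (List Int) × List (List Int)),
      l.foldl (fun st2 col => if row = (n : Int) - 1 ∧ col = (n : Int) - 1 then st2
        else (aCell (fun xs => PySem.List.max? xs (fun x => x)) (n : Int) grid st2.1 row col,
              aCell (fun xs => PySem.List.min? xs (fun x => x)) (n : Int) grid st2.2 row col)) st
      = (l.foldl (fun t col => if row = (n : Int) - 1 ∧ col = (n : Int) - 1 then t
            else aCell (fun xs => PySem.List.max? xs (fun x => x)) (n : Int) grid t row col) st.1,
         l.foldl (fun t col => if row = (n : Int) - 1 ∧ col = (n : Int) - 1 then t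
            else aCell (fun xs => PySem.List.min? xs (fun x => x)) (n : Int) grid t row col) st.2) := by
    intro l row st
    induction l generalizing st with
    | nil => rfl
    | cons x xs ih =>
      simp only [List.foldl_cons]
      rw [ih]
      by_cases hcond : row = (n : Int) - 1 ∧ x = (n : Int) - 1
      · rw [if_pos hcond, if_pos hcond, if_pos hcond]
      · rw [if_neg hcond, if_neg hcond, if_neg hcond]
  have hbody : (fun (st : List (List Int) × List (List Int)) (row : Int) =>
        ((List.range n).map (fun (k : Nat) => (n : Int) - 1 - (k : Int))).foldl
          (fun st2 col => if row = (n : Int) - 1 ∧ col = (n : Int) - 1 then st2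
            else (aCell (fun xs => PySem.List.max? xs (fun x => x)) (n : Int) grid st2.1 row col,
                  aCell (fun xs => PySem.List.min? xs (fun x => x)) (n : Int) grid st2.2 row col)) st)
      = (fun st row =>
          (((List.range n).map (fun (k : Nat) => (n : Int) - 1 - (k : Int))).foldl
            (fun t col => if row = (n : Int) - 1 ∧ col = (n : Int) - 1 then t
              else aCell (fun xs => PySem.List.max? xs (fun x => x)) (n : Int) grid t row col) st.1,
           ((List.range n).map (fun (k : Nat) => (n : Int) - 1 - (k : Int))).foldl
            (fun t col => if row = (n : Int) - 1 ∧ col = (n : Int) - 1 then t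
              else aCell (fun xs => PySem.List.min? xs (fun x => x)) (n : Int) grid t row col) st.2)) := by
    funext st row
    exact hsplit _ row st
  have hpair : ∀ (l : List Int) (st : List (List Int) × List (List Int)),
      l.foldl (fun st row =>
        ((List.range n).map (fun (k : Nat) => (n : Int) - 1 - (k : Int))).foldl
          (fun st2 col => if row = (n : Int) - 1 ∧ col = (n : Int) - 1 then st2
            else (aCell (fun xs => PySem.List.max? xs (fun x => x)) (n : Int) grid st2.1 row col,
                  aCell (fun xs => PySem.List.min? xs (fun x => x)) (n : Int) grid st2.2 row col)) st) st
      = (l.foldl (fun t row =>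
            ((List.range n).map (fun (k : Nat) => (n : Int) - 1 - (k : Int))).foldl
              (fun t2 col => if row = (n : Int) - 1 ∧ col = (n : Int) - 1 then t2
                else aCell (fun xs => PySem.List.max? xs (fun x => x)) (n : Int) grid t2 row col) t) st.1,
         l.foldl (fun t row =>
            ((List.range n).map (fun (k : Nat) => (n : Int) - 1 - (k : Int))).foldl
              (fun t2 col => if row = (n : Int) - 1 ∧ col = (n : Int) - 1 then t2
                else aCell (fun xs => PySem.List.min? xs (fun x => x)) (n : Int) grid t2 row col) t) st.2) := by
    intro l
    induction l with
    | nil => intro st; rfl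
    | cons x xs ih =>
      intro st
      simp only [List.foldl_cons]
      rw [hsplit _ x st]
      exact ih _
  rw [hpair]
  refine Prod.ext ?_ ?_
  · exact tableA _ _ max_sel_one max_sel_two grid h1 h2
  · exact tableA _ _ min_sel_one min_sel_two grid h1 h2
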